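-- pv_equiv track=rewrite | github.com/danialhamedi/CodeForce | R927Div3/thronsAndCoins.py | map_array
-- ===== SOURCE A (Python) =====
-- def map_array(arr):
--     result = []
--     consecutive_stars = False
--
--     for elem in arr:
--         if elem == "@":
--             result.append(1)
--             consecutive_stars = False
--         elif elem == ".":
--             result.append(0)
--             consecutive_stars = False
--         elif elem == "*":
--             if consecutive_stars:
--                 result.append(0)
--             else:
--                 result.append(1)
--             consecutive_stars = True
--
--     return result
-- ===== SOURCE B (Python) =====
-- def map_array(arr):
--     # run-length grouping over the recognized symbols (others are skipped entirely)
--     keep = [e for e in arr if e in ("@", ".", "*")]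
--     result = []
--     i = 0
--     while i < len(keep):
--         j = i
--         while j < len(keep) and keep[j] == keep[i]:
--             j += 1
--         n = j - i
--         if keep[i] == "@":
--             result += [1] * n
--         elif keep[i] == ".":
--             result += [0] * n
--         else:  # "*": only the first star of a run yields a coin
--             result += [1] + [0] * (n - 1)
--         i = j
--     return result
-- ===== Notes on version B (the rewrite author's own statement) =====
-- stated objective: alternative
-- what changed: B filters to the recognized symbols and processes them as maximal runs of equal symbols (run-length grouping, emitting [1]*n, [0]*n or [1]+[0]*(n-1) per run) instead of A's element-by-element loop with a consecutive_stars flag.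
import Mathlib
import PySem

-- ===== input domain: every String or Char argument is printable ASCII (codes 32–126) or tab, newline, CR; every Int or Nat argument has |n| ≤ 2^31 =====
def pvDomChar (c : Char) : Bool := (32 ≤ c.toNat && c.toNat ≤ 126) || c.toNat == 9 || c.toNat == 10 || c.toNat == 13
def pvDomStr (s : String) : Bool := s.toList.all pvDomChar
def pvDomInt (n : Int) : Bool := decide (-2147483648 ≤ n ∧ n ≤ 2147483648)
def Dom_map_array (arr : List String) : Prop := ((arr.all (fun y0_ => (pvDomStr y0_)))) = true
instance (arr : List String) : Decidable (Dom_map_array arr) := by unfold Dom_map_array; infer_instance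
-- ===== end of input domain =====

-- B re-implements A's flag-tracking loop as run-length grouping over the recognized symbols; same cost, different decomposition.

-- ===== PORT A =====
-- state = (result, consecutive_stars)
def stepA (st : List Int × Bool) (elem : String) : List Int × Bool :=
  if elem == "@" then (st.1 ++ [1], false)
  else if elem == "." then (st.1 ++ [0], false)
  else if elem == "*" then (st.1 ++ [if st.2 then 0 else 1], true)
  else st

def map_array (arr : List String) : List Int :=
  (arr.foldl stepA ([], false)).1

-- ===== PORT B =====
def keepElem (e : String) : Bool := e == "@" || e == "." || e == "*"

-- output for one maximal run of n equal recognized symbols k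
def runOut (k : String) (n : Nat) : List Int :=
  if k == "@" then List.replicate n 1
  else if k == "." then List.replicate n 0
  else 1 :: List.replicate (n - 1) 0

def runsB : List String → List Int
  | [] => []
  | x :: xs =>
    runOut x ((xs.takeWhile (fun y => y == x)).length + 1) ++
      runsB (xs.dropWhile (fun y => y == x))
termination_by l => l.length
decreasing_by
  simp only [List.length_cons]
  exact Nat.lt_succ_of_le (List.length_dropWhile_le _ _)

def map_array_alt (arr : List String) : List Int :=
  runsB (arr.filter keepElem)

-- ===== PRECONDITION & SPEC =====
def Spec_map_array (arr : List String) (out : List Int) : Prop := out = map_array_alt arr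
instance (arr : List String) (out : List Int) : Decidable (Spec_map_array arr out) := by unfold Spec_map_array; infer_instance

-- ===== CLAIM (what is proved, stated in full; the proofs are below) =====
def Claim_equal_map_array : Prop := ∀ (arr : List String), Dom_map_array arr → Spec_map_array arr (map_array arr)

-- ===== LEMMAS AND PROOFS =====

-- functional form of A's loop: flag b, remaining list
def grec (b : Bool) : List String → List Int
  | [] => []
  | x :: xs =>
    if x == "@" then 1 :: grec false xs
    else if x == "." then 0 :: grec false xs
    else if x == "*" then (if b then 0 else 1) :: grec true xs
    else grec b xs

theorem foldA_eq (l : List String) (acc : List Int) (b : Bool) :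
    (l.foldl stepA (acc, b)).1 = acc ++ grec b l := by
  induction l generalizing acc b with
  | nil => simp [grec]
  | cons x xs ih =>
    simp only [List.foldl_cons, stepA, grec]
    by_cases h1 : x = "@"
    · simp [h1, ih]
    · by_cases h2 : x = "."
      · simp [h1, h2, ih]
      · by_cases h3 : x = "*"
        · simp [h1, h2, h3, ih]
        · simp [h1, h2, h3, ih]

theorem grec_filter (b : Bool) (l : List String) :
    grec b l = grec b (l.filter keepElem) := by
  induction l generalizing b with
  | nil => simp
  | cons x xs ih =>
    by_cases h1 : x = "@"
    · simp [grec, h1, keepElem, List.filter, ih]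
    · by_cases h2 : x = "."
      · simp [grec, h1, h2, keepElem, List.filter, ih]
      · by_cases h3 : x = "*"
        · simp [grec, h3, keepElem, List.filter, ih]
        · have hk : keepElem x = false := by simp [keepElem, h1, h2, h3]
          simp [grec, h1, h2, h3, List.filter, hk, ih]

theorem grec_run_at (t d : List String) (ht : ∀ y ∈ t, y = "@") :
    grec false (t ++ d) = List.replicate t.length 1 ++ grec false d := by
  induction t with
  | nil => simp
  | cons y ys ih =>
    have hy := ht y (List.mem_cons_self)
    simp [grec, hy, ih (fun z hz => ht z (List.mem_cons_of_mem _ hz)), List.replicate_succ]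

theorem grec_run_dot (t d : List String) (ht : ∀ y ∈ t, y = ".") :
    grec false (t ++ d) = List.replicate t.length 0 ++ grec false d := by
  induction t with
  | nil => simp
  | cons y ys ih =>
    have hy := ht y (List.mem_cons_self)
    simp [grec, hy, ih (fun z hz => ht z (List.mem_cons_of_mem _ hz)), List.replicate_succ]

theorem grec_run_star (t d : List String) (ht : ∀ y ∈ t, y = "*") :
    grec true (t ++ d) = List.replicate t.length 0 ++ grec true d := by
  induction t with
  | nil => simp
  | cons y ys ih =>
    have hy := ht y (List.mem_cons_self)
    simp [grec, hy, ih (fun z hz => ht z (List.mem_cons_of_mem _ hz)), List.replicate_succ]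

-- if the first element of d is recognized and is not "*", the star flag is irrelevant
theorem grec_true_eq_false (d : List String)
    (hd : ∀ y ∈ d, keepElem y = true)
    (hne : ∀ h : d ≠ [], d.head h ≠ "*") :
    grec true d = grec false d := by
  cases d with
  | nil => rfl
  | cons x xs =>
    have hx : keepElem x = true := hd x (List.mem_cons_self)
    have hxs : x ≠ "*" := hne (by simp)
    simp only [keepElem, Bool.or_eq_true, beq_iff_eq] at hx
    rcases hx with (h | h) | h
    · simp [grec, h]
    · simp [grec, h]
    · exact absurd h hxs

theorem grec_eq_runsB (m : List String) (hm : ∀ y ∈ m, keepElem y = true) :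
    grec false m = runsB m := by
  induction m using runsB.induct with
  | case1 => simp [grec, runsB]
  | case2 x xs ih =>
    have hx : keepElem x = true := hm x (List.mem_cons_self)
    set t := xs.takeWhile (fun y => y == x) with hT
    set d := xs.dropWhile (fun y => y == x) with hD
    have hsplit : t ++ d = xs := List.takeWhile_append_dropWhile
    have ht : ∀ y ∈ t, y = x := by
      intro y hy
      have := List.mem_takeWhile_imp hy
      simpa using this
    have hd : ∀ y ∈ d, keepElem y = true := by
      intro y hy
      exact hm y (List.mem_cons_of_mem _ ((hsplit ▸ List.mem_append_right t hy : y ∈ xs)))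
    have hdne : ∀ h : d ≠ [], d.head h ≠ x := by
      intro h
      have := List.head_dropWhile_not (p := fun y => y == x) (l := xs) h
      simpa using this
    have ihd := ih (fun y hy => hm y (List.mem_cons_of_mem _ (hsplit ▸ List.mem_append_right t hy)))
    simp only [keepElem, Bool.or_eq_true, beq_iff_eq] at hx
    rcases hx with (h | h) | h
    · -- x = "@"
      subst h
      have : grec false ("@" :: xs) = 1 :: grec false (t ++ d) := by
        rw [hsplit]; simp [grec]
      rw [this, grec_run_at t d ht, ihd]
      simp [runsB, runOut, ← hT, ← hD, List.replicate_succ]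
    · -- x = "."
      subst h
      have : grec false ("." :: xs) = 0 :: grec false (t ++ d) := by
        rw [hsplit]; simp [grec]
      rw [this, grec_run_dot t d ht, ihd]
      simp [runsB, runOut, ← hT, ← hD, List.replicate_succ]
    · -- x = "*"
      subst h
      have hstar : grec false ("*" :: xs) = 1 :: grec true (t ++ d) := by
        rw [hsplit]; simp [grec]
      have hdd : grec true d = grec false d :=
        grec_true_eq_false d hd hdne
      rw [hstar, grec_run_star t d ht, hdd, ihd]
      simp [runsB, runOut, ← hT, ← hD]

-- ===== VERDICT (by name: the statement is the Claim_ definition above) =====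
theorem map_array_spec : Claim_equal_map_array := by
  intro arr _
  unfold Spec_map_array map_array map_array_alt
  rw [foldA_eq, List.nil_append, grec_filter, grec_eq_runsB]
  intro y hy
  exact List.of_mem_filter hy
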